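-- pv_equiv track=rewrite | github.com/Al-Log/Scaf-1007 | day21/solutions21.py | solution
-- ===== SOURCE A (Python) =====
-- from collections import Counter
--
-- def solution(topping):
--     answer=0
--     a=Counter(topping)
--     b=set()
--     for k in topping:
--         a[k]-=1
--         if a[k]==0:
--             del a[k]
--         b.add(k)
--         if len(a)==len(b):
--             answer+=1
--     return answer
-- ===== SOURCE B (Python) =====
-- def solution(topping):
--     pre = []
--     seen = set()
--     for x in topping:
--         seen.add(x)
--         pre.append(len(seen))
--     suf = []
--     seen = set()
--     for x in reversed(topping):
--         suf.append(len(seen))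
--         seen.add(x)
--     suf.reverse()
--     return sum(1 for p, s in zip(pre, suf) if p == s)
-- ===== Notes on version B (the rewrite author's own statement) =====
-- stated objective: alternative
-- what changed: A's single fused pass maintaining a mutable Counter (decrement/delete) is replaced by two independent scans building prefix-distinct and suffix-distinct arrays which are then compared pointwise with zip.
import Mathlib
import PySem

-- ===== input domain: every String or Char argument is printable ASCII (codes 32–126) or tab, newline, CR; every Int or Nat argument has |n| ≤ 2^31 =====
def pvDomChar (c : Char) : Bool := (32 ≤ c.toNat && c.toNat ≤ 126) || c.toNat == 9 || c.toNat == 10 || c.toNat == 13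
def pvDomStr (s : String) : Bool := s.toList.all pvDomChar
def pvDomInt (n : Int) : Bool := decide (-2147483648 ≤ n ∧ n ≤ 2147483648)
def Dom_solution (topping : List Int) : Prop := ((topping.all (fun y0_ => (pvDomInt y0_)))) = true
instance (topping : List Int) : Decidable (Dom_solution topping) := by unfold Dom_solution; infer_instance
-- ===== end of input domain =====

-- B replaces A's single fused pass over a mutable Counter by two independent
-- prefix-/suffix-distinct-count scans compared pointwise (alternative decomposition, same O(n) cost).


-- ===== PORT A =====
def solution (topping : List Int) : Int :=
  (topping.foldl
    (fun (s : Int × PySem.Dict Int Int × PySem.Set Int) (k : Int) =>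
      let a1 := s.2.1.modify k 0 (fun v => v - 1)
      let a2 := if a1.getD k 0 = 0 then a1.erase k else a1
      let b2 := PySem.Set.add s.2.2 k
      ((if a2.size = b2.length then s.1 + 1 else s.1), a2, b2))
    ((0 : Int), PySem.Dict.counter topping, (PySem.Set.empty : PySem.Set Int))).1

-- ===== PORT B =====
def solution_alt (topping : List Int) : Int :=
  let pre := (topping.foldl
    (fun (s : PySem.Set Int × List Nat) (x : Int) =>
      let seen := PySem.Set.add s.1 x
      (seen, s.2 ++ [seen.length])) ((PySem.Set.empty : PySem.Set Int), ([] : List Nat))).2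
  let suf := ((topping.reverse.foldl
    (fun (s : PySem.Set Int × List Nat) (x : Int) =>
      (PySem.Set.add s.1 x, s.2 ++ [s.1.length])) ((PySem.Set.empty : PySem.Set Int), ([] : List Nat))).2).reverse
  ((pre.zip suf).countP (fun q => q.1 == q.2) : Int)

-- ===== PRECONDITION & SPEC =====
def Spec_solution (topping : List Int) (out : Int) : Prop := out = solution_alt topping
instance (topping : List Int) (out : Int) : Decidable (Spec_solution topping out) := by unfold Spec_solution; infer_instance

-- ===== CLAIM (what is proved, stated in full; the proofs are below) =====
def Claim_equal_solution : Prop := ∀ (topping : List Int), Dom_solution topping → Spec_solution topping (solution topping)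

-- ===== LEMMAS AND PROOFS =====

-- number of distinct values of a list
def dc (l : List Int) : Nat := l.toFinset.card

-- reference spec: Z p r = number of positions i in r such that the distinct count of the
-- prefix (p ++ r-up-to-i) equals the distinct count of the rest of r
def Z : List Int → List Int → Int
  | _, [] => 0
  | p, k :: r => (if dc (p ++ [k]) = dc r then 1 else 0) + Z (p ++ [k]) r

lemma length_eq_dc {l r : List Int} (h : l.Nodup) (hm : ∀ v, v ∈ l ↔ v ∈ r) :
    l.length = dc r := by
  have h1 : l.toFinset = r.toFinset := by
    ext v; simp [List.mem_toFinset, hm v]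
  unfold dc
  rw [← h1, List.toFinset_card_of_nodup h]

lemma ofList_append_singleton (xs : List Int) (k : Int) :
    PySem.Set.ofList (xs ++ [k]) = PySem.Set.add (PySem.Set.ofList xs) k := by
  simp [PySem.Set.ofList_eq_foldl]

lemma length_ofList (p : List Int) : (PySem.Set.ofList p).length = dc p :=
  length_eq_dc (PySem.Set.nodup_ofList p) (PySem.Set.mem_ofList p)

-- erase facts (no erase lemmas in the prelude)
lemma find?_filter_ne (l : List (Int × Int)) {v k : Int} (h : v ≠ k) :
    List.find? (fun p => p.1 == v) (l.filter (fun p => !(p.1 == k)))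
      = List.find? (fun p => p.1 == v) l := by
  induction l with
  | nil => rfl
  | cons hd t ih =>
      by_cases hk : hd.1 = k
      · have hkv : (k == v) = false := by
          simp only [beq_eq_false_iff_ne]
          exact fun e => h e.symm
        simp [hk, hkv, ih]
      · by_cases hv : hd.1 = v
        · simp [hv, h]
        · simp [hk, hv, ih]

lemma get?_erase_of_ne (d : PySem.Dict Int Int) {v k : Int} (h : v ≠ k) :
    (d.erase k).get? v = d.get? v := by
  simp only [PySem.Dict.erase, PySem.Dict.get?]
  rw [find?_filter_ne d.items h]

lemma get?_erase_self (d : PySem.Dict Int Int) (k : Int) :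
    (d.erase k).get? k = none := by
  have hf : List.find? (fun p => p.1 == k) (d.items.filter (fun p => !(p.1 == k))) = none := by
    rw [List.find?_eq_none]
    intro x hx
    have := (List.mem_filter.mp hx).2
    simpa using this
  simp [PySem.Dict.erase, PySem.Dict.get?, hf]

lemma getD_erase_of_ne (d : PySem.Dict Int Int) {v k : Int} (h : v ≠ k) :
    (d.erase k).getD v 0 = d.getD v 0 := by
  rw [PySem.Dict.getD_eq_get?_getD, get?_erase_of_ne d h, ← PySem.Dict.getD_eq_get?_getD]

lemma getD_erase_self (d : PySem.Dict Int Int) (k : Int) :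
    (d.erase k).getD k 0 = 0 := by
  rw [PySem.Dict.getD_eq_get?_getD, get?_erase_self]; rfl

lemma keys_erase (d : PySem.Dict Int Int) (k : Int) :
    (d.erase k).keys = d.keys.filter (fun v => !(v == k)) := by
  obtain ⟨l⟩ := d
  simp only [PySem.Dict.erase, PySem.Dict.keys]
  induction l with
  | nil => rfl
  | cons hd t ih =>
      by_cases hk : hd.1 = k
      · simpa [List.filter_cons, List.map_cons, hk] using ih
      · simpa [List.filter_cons, List.map_cons, hk] using ih

lemma mem_keys_erase (d : PySem.Dict Int Int) (k v : Int) :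
    v ∈ (d.erase k).keys ↔ v ∈ d.keys ∧ v ≠ k := by
  rw [keys_erase]; simp [List.mem_filter]

lemma nodup_keys_erase {d : PySem.Dict Int Int} (h : d.keys.Nodup) (k : Int) :
    (d.erase k).keys.Nodup := by
  rw [keys_erase]; exact h.filter _

lemma keys_length_eq_size (d : PySem.Dict Int Int) : d.keys.length = d.size := by
  simp [PySem.Dict.keys, PySem.Dict.size]

-- the loop invariant for A's fused pass
lemma A_loop (r : List Int) : ∀ (p : List Int) (ans : Int) (a : PySem.Dict Int Int),
    (∀ v, a.getD v 0 = (r.count v : Int)) →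
    (∀ v, v ∈ a.keys ↔ v ∈ r) →
    a.keys.Nodup →
    (r.foldl
      (fun (s : Int × PySem.Dict Int Int × PySem.Set Int) (k : Int) =>
        let a1 := s.2.1.modify k 0 (fun v => v - 1)
        let a2 := if a1.getD k 0 = 0 then a1.erase k else a1
        let b2 := PySem.Set.add s.2.2 k
        ((if a2.size = b2.length then s.1 + 1 else s.1), a2, b2))
      (ans, a, PySem.Set.ofList p)).1 = ans + Z p r := by
  induction r with
  | nil => intro p ans a _ _ _; simp [Z]
  | cons k r ih =>
      intro p ans a h1 h2 h3
      rw [List.foldl_cons]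
      simp only []
      have hcont : a.contains k = true := by
        rw [PySem.Dict.contains_iff_mem_keys]
        exact (h2 k).mpr List.mem_cons_self
      have h1' : ∀ v, (a.modify k 0 (fun v => v - 1)).getD v 0 = (r.count v : Int) := by
        intro v
        rw [show a.modify k 0 (fun v => v - 1) = a.insert k (a.getD k 0 - 1) from rfl,
          PySem.Dict.getD_insert]
        by_cases hv : v = k
        · subst hv
          rw [if_pos rfl, h1 v, List.count_cons_self]
          push_cast
          ring
        · have hv2 : ¬ (k = v) := fun e => hv e.symm
          rw [if_neg hv, h1 v]
          simp [hv2]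
      have hk1 : (a.modify k 0 (fun v => v - 1)).keys = a.keys := by
        rw [show a.modify k 0 (fun v => v - 1) = a.insert k (a.getD k 0 - 1) from rfl]
        exact PySem.Dict.keys_insert_of_contains _ _ hcont
      have h2' : ∀ v, v ∈ (a.modify k 0 (fun v => v - 1)).keys ↔ v ∈ (k :: r) := by
        intro v; rw [hk1]; exact h2 v
      have h3' : (a.modify k 0 (fun v => v - 1)).keys.Nodup := by rw [hk1]; exact h3
      have h1'' : ∀ v,
          (if (a.modify k 0 (fun v => v - 1)).getD k 0 = 0
            then (a.modify k 0 (fun v => v - 1)).erase k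
            else a.modify k 0 (fun v => v - 1)).getD v 0 = (r.count v : Int) := by
        intro v
        split_ifs with hz
        · by_cases hv : v = k
          · subst hv
            rw [getD_erase_self]
            rw [h1' v] at hz
            omega
          · rw [getD_erase_of_ne _ hv]
            exact h1' v
        · exact h1' v
      have h2'' : ∀ v, v ∈
          (if (a.modify k 0 (fun v => v - 1)).getD k 0 = 0
            then (a.modify k 0 (fun v => v - 1)).erase k
            else a.modify k 0 (fun v => v - 1)).keys ↔ v ∈ r := by
        intro v
        split_ifs with hz
        · rw [mem_keys_erase, h2' v]
          have hkr : k ∉ r := by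
            have hc := h1' k
            rw [hz] at hc
            have hcount : r.count k = 0 := by omega
            exact List.count_eq_zero.mp hcount
          constructor
          · rintro ⟨hv, hne⟩
            rcases List.mem_cons.mp hv with h | h
            · exact absurd h hne
            · exact h
          · intro hv
            refine ⟨List.mem_cons_of_mem _ hv, ?_⟩
            rintro rfl
            exact hkr hv
        · have hkr : k ∈ r := by
            have hc := h1' k
            rw [hc] at hz
            have : r.count k ≠ 0 := by omega
            exact List.count_pos_iff.mp (Nat.pos_of_ne_zero this)
          rw [h2' v]
          constructor
          · intro hv
            rcases List.mem_cons.mp hv with h | h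
            · subst h; exact hkr
            · exact h
          · exact List.mem_cons_of_mem _
      have h3'' :
          (if (a.modify k 0 (fun v => v - 1)).getD k 0 = 0
            then (a.modify k 0 (fun v => v - 1)).erase k
            else a.modify k 0 (fun v => v - 1)).keys.Nodup := by
        split_ifs with hz
        · exact nodup_keys_erase h3' k
        · exact h3'
      have hsize :
          (if (a.modify k 0 (fun v => v - 1)).getD k 0 = 0
            then (a.modify k 0 (fun v => v - 1)).erase k
            else a.modify k 0 (fun v => v - 1)).size = dc r := by
        rw [← keys_length_eq_size]
        exact length_eq_dc h3'' h2''
      have hb : PySem.Set.add (PySem.Set.ofList p) k = PySem.Set.ofList (p ++ [k]) :=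
        (ofList_append_singleton p k).symm
      rw [hb]
      rw [ih (p ++ [k]) _ _ h1'' h2'' h3'']
      rw [length_ofList, hsize]
      rw [show Z p (k :: r) = (if dc (p ++ [k]) = dc r then 1 else 0) + Z (p ++ [k]) r from rfl]
      by_cases hd : dc (p ++ [k]) = dc r
      · rw [if_pos hd.symm, if_pos hd]; ring
      · rw [if_neg (fun e => hd e.symm), if_neg hd]; ring

lemma A_char (t : List Int) : solution t = Z [] t := by
  unfold solution
  have h0 : (PySem.Set.empty : PySem.Set Int) = PySem.Set.ofList [] := rfl
  rw [h0]
  rw [A_loop t [] 0 (PySem.Dict.counter t)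
        (fun v => PySem.Dict.getD_counter t v)
        (fun v => by rw [PySem.Dict.keys_counter]; exact PySem.Set.mem_ofList t v)
        (PySem.Dict.nodup_keys_counter t)]
  ring

-- B's first scan builds the prefix distinct counts
lemma B_pre (t : List Int) : ∀ (p : List Int) (acc : List Nat),
    (t.foldl
      (fun (s : PySem.Set Int × List Nat) (x : Int) =>
        let seen := PySem.Set.add s.1 x
        (seen, s.2 ++ [seen.length])) (PySem.Set.ofList p, acc)).2
    = acc ++ (List.range t.length).map (fun i => dc (p ++ t.take (i + 1))) := by
  induction t with
  | nil => intro p acc; simp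
  | cons x t ih =>
      intro p acc
      rw [List.foldl_cons]
      simp only []
      have hset : PySem.Set.add (PySem.Set.ofList p) x = PySem.Set.ofList (p ++ [x]) :=
        (ofList_append_singleton p x).symm
      rw [hset, ih (p ++ [x]) _, length_ofList]
      rw [List.length_cons, List.range_succ_eq_map, List.map_cons, List.map_map,
        List.append_assoc]
      congr 1
      simp only [List.singleton_append]
      congr 1
      apply List.map_congr_left
      intro i _
      simp [Function.comp, List.take_succ_cons, List.append_assoc, Nat.succ_eq_add_one]

-- B's second scan builds (reversed) the suffix distinct counts
lemma B_suf (u : List Int) : ∀ (p : List Int) (acc : List Nat),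
    (u.foldl
      (fun (s : PySem.Set Int × List Nat) (x : Int) =>
        (PySem.Set.add s.1 x, s.2 ++ [s.1.length])) (PySem.Set.ofList p, acc)).2
    = acc ++ (List.range u.length).map (fun j => dc (p ++ u.take j)) := by
  induction u with
  | nil => intro p acc; simp
  | cons x u ih =>
      intro p acc
      rw [List.foldl_cons]
      simp only []
      have hset : PySem.Set.add (PySem.Set.ofList p) x = PySem.Set.ofList (p ++ [x]) :=
        (ofList_append_singleton p x).symm
      rw [hset, ih (p ++ [x]) _, length_ofList]
      rw [List.length_cons, List.range_succ_eq_map, List.map_cons, List.map_map,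
        List.append_assoc]
      congr 1
      simp only [List.singleton_append]
      congr 1
      · simp
      · apply List.map_congr_left
        intro i _
        simp [Function.comp, List.take_succ_cons, List.append_assoc, Nat.succ_eq_add_one]

lemma Z_eq (r : List Int) : ∀ p : List Int,
    Z p r = ((List.range r.length).countP
      (fun i => decide (dc (p ++ r.take (i + 1)) = dc (r.drop (i + 1)))) : Int) := by
  induction r with
  | nil => intro p; simp [Z]
  | cons k r ih =>
      intro p
      rw [List.length_cons, List.range_succ_eq_map, List.countP_cons, List.countP_map]
      rw [show Z p (k :: r) = (if dc (p ++ [k]) = dc r then 1 else 0) + Z (p ++ [k]) r from rfl]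
      rw [ih (p ++ [k])]
      have htail : List.countP
            ((fun i => decide (dc (p ++ (k :: r).take (i + 1)) = dc ((k :: r).drop (i + 1))))
              ∘ Nat.succ) (List.range r.length)
          = List.countP
            (fun i => decide (dc (p ++ [k] ++ r.take (i + 1)) = dc (r.drop (i + 1))))
            (List.range r.length) := by
        apply List.countP_congr
        intro i _
        simp [Function.comp, List.take_succ_cons, List.append_assoc, Nat.succ_eq_add_one]
      rw [htail]
      have hhead : (decide (dc (p ++ (k :: r).take (0 + 1)) = dc ((k :: r).drop (0 + 1))))
          = decide (dc (p ++ [k]) = dc r) := by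
        norm_num
      rw [hhead]
      push_cast
      by_cases hd : dc (p ++ [k]) = dc r
      · simp only [hd, decide_true, if_pos]
        ring
      · simp only [hd, decide_false]
        push_cast
        ring

lemma B_char (t : List Int) :
    solution_alt t
      = ((List.range t.length).countP
          (fun i => decide (dc (t.take (i + 1)) = dc (t.drop (i + 1)))) : Int) := by
  unfold solution_alt
  simp only []
  have h0 : (PySem.Set.empty : PySem.Set Int) = PySem.Set.ofList [] := rfl
  rw [h0]
  rw [B_pre t [] [], B_suf t.reverse [] []]
  simp only [List.nil_append, List.length_reverse]
  have hsuf : ((List.range t.length).map (fun j => dc (t.reverse.take j))).reverse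
      = (List.range t.length).map (fun i => dc (t.drop (i + 1))) := by
    apply List.ext_getElem
    · simp
    · intro i h1 h2
      simp only [List.length_reverse, List.length_map, List.length_range] at h1 h2
      rw [List.getElem_reverse]
      simp only [List.length_map, List.length_range, List.getElem_map, List.getElem_range]
      have htk : t.reverse.take (t.length - 1 - i) = (t.drop (t.length - (t.length - 1 - i))).reverse := by
        rw [List.take_reverse]
      have hidx : t.length - (t.length - 1 - i) = i + 1 := by omega
      rw [htk, hidx]
      unfold dc
      simp
  rw [hsuf]
  rw [List.zip_map']
  rw [List.countP_map]
  apply congrArg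
  apply List.countP_congr
  intro i _
  simp [Function.comp]

-- ===== VERDICT (by name: the statement is the Claim_ definition above) =====
theorem solution_spec : Claim_equal_solution := by
  intro t _
  unfold Spec_solution
  rw [A_char t, Z_eq t [], B_char t]
  apply congrArg
  apply List.countP_congr
  intro i _
  simp
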